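-- pv_equiv track=rewrite | github.com/lhy0718/RepoAgents | src/reporepublic/sync_manifest_reports.py | normalize_sync_manifest_report_formats
-- ===== SOURCE A (Python) =====
-- VALID_SYNC_MANIFEST_REPORT_FORMATS = ("json", "markdown")
--
-- def normalize_sync_manifest_report_formats(
--     formats: tuple[str, ...] | list[str] | None,
-- ) -> tuple[str, ...]:
--     if not formats:
--         return ("json",)
--     normalized: list[str] = []
--     for value in formats:
--         lowered = value.strip().lower()
--         if not lowered:
--             continue
--         if lowered == "all":
--             for item in VALID_SYNC_MANIFEST_REPORT_FORMATS:
--                 if item not in normalized: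
--                     normalized.append(item)
--             continue
--         if lowered not in VALID_SYNC_MANIFEST_REPORT_FORMATS:
--             raise ValueError(
--                 "Unsupported sync manifest report format. Expected one of: json, markdown, all"
--             )
--         if lowered not in normalized:
--             normalized.append(lowered)
--     return tuple(normalized or ("json",))
-- ===== SOURCE B (Python) =====
-- VALID_SYNC_MANIFEST_REPORT_FORMATS = ("json", "markdown")
--
--
-- def normalize_sync_manifest_report_formats(formats):
--     if not formats:
--         return ("json",)
--     # Instead of building a deduplicated list, record the position of the first
--     # token that contributes each valid format, then reconstruct the answer
--     # from those two indices at the end (json wins ties, as 'all' lists it first).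
--     first_json = None
--     first_markdown = None
--     for pos, value in enumerate(formats):
--         token = value.strip().lower()
--         if not token:
--             continue
--         if token == "all":
--             if first_json is None:
--                 first_json = pos
--             if first_markdown is None:
--                 first_markdown = pos
--         elif token == "json":
--             if first_json is None:
--                 first_json = pos
--         elif token == "markdown":
--             if first_markdown is None:
--                 first_markdown = pos
--         else:
--             raise ValueError(
--                 "Unsupported sync manifest report format. Expected one of: json, markdown, all"
--             )
--     if first_json is None and first_markdown is None:
--         return ("json",)
--     if first_markdown is None:
--         return ("json",)
--     if first_json is None:
--         return ("markdown",)
--     if first_json <= first_markdown: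
--         return ("json", "markdown")
--     return ("markdown", "json")
-- ===== Notes on version B (the rewrite author's own statement) =====
-- stated objective: alternative
-- what changed: Instead of building an order-preserving deduplicated list, B records only the index of the first token contributing 'json' and of the first contributing 'markdown' and reconstructs the result tuple from comparing those two indices at the end (json first on ties, as 'all' emits it first).
import Mathlib
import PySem

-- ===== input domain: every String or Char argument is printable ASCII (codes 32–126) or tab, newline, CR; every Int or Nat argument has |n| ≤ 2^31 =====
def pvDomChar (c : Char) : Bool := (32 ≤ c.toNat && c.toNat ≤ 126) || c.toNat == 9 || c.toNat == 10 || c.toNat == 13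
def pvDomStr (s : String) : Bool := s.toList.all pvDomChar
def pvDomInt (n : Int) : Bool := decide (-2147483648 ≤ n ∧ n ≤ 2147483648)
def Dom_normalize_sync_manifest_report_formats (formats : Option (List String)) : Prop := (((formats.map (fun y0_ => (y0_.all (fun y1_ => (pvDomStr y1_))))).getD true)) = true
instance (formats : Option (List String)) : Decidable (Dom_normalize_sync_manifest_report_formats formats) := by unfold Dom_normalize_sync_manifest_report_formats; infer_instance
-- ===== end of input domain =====

-- B replaces A's deduplicated-list construction by tracking only the first index
-- contributing 'json' and the first contributing 'markdown', rebuilding the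
-- result from those two indices at the end (objective: alternative algorithm).

-- ===== PORT A =====
-- 'if item not in normalized: normalized.append(item)', A's dedup-append step
def pvAppendIfNew (acc : List String) (item : String) : List String :=
  if item ∈ acc then acc else acc ++ [item]

-- A's for-loop over formats; 'none' = the ValueError branch was reached
def pvAloop (acc : List String) : List String → Option (List String)
  | [] => some acc
  | v :: rest =>
    let lowered := PySem.Str.lower (PySem.Str.strip v)
    if lowered = "" then pvAloop acc rest
    else if lowered = "all" then
      pvAloop (["json", "markdown"].foldl pvAppendIfNew acc) rest
    else if ¬ (lowered ∈ ["json", "markdown"]) then none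
    else pvAloop (pvAppendIfNew acc lowered) rest

def normalize_sync_manifest_report_formats (formats : Option (List String)) : List String :=
  match formats with
  | none => ["json"]
  | some fs =>
    if fs = [] then ["json"]
    else
      match pvAloop [] fs with
      | none => []  -- ValueError; excluded by Pre_
      | some normalized => if normalized = [] then ["json"] else normalized

-- ===== PORT B =====
-- Source B's loop over enumerate(formats); state = (first_json, first_markdown);
-- 'none' result = the ValueError branch was reached
def pvBloop (pos : Int) (fj fm : Option Int) : List String → Option (Option Int × Option Int)
  | [] => some (fj, fm)
  | v :: rest =>
    let token := PySem.Str.lower (PySem.Str.strip v)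
    if token = "" then pvBloop (pos + 1) fj fm rest
    else if token = "all" then
      pvBloop (pos + 1) (if fj = none then some pos else fj)
        (if fm = none then some pos else fm) rest
    else if token = "json" then
      pvBloop (pos + 1) (if fj = none then some pos else fj) fm rest
    else if token = "markdown" then
      pvBloop (pos + 1) fj (if fm = none then some pos else fm) rest
    else none

def normalize_sync_manifest_report_formats_alt (formats : Option (List String)) : List String :=
  match formats with
  | none => ["json"]
  | some fs =>
    if fs = [] then ["json"]
    else
      match pvBloop 0 none none fs with
      | none => []  -- ValueError; excluded by Pre_
      | some (fj, fm) =>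
        match fj, fm with
        | none, none => ["json"]
        | some _, none => ["json"]
        | none, some _ => ["markdown"]
        | some i, some j =>
          if i ≤ j then ["json", "markdown"] else ["markdown", "json"]

-- ===== PRECONDITION & SPEC =====
-- Pre_ excludes exactly the inputs on which A raises ValueError: a list containing a
-- token whose strip().lower() is none of '', 'all', 'json', 'markdown'.
def Pre_normalize_sync_manifest_report_formats (formats : Option (List String)) : Prop :=
  ∀ v ∈ formats.getD [],
    PySem.Str.lower (PySem.Str.strip v) ∈ ["", "all", "json", "markdown"]
instance (formats : Option (List String)) : Decidable (Pre_normalize_sync_manifest_report_formats formats) := by unfold Pre_normalize_sync_manifest_report_formats; infer_instance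

def pvWitness_normalize_sync_manifest_report_formats : Option (List String) :=
  some ["JSON", " all ", "", "markdown"]

def Spec_normalize_sync_manifest_report_formats (formats : Option (List String)) (out : List String) : Prop := out = normalize_sync_manifest_report_formats_alt formats
instance (formats : Option (List String)) (out : List String) : Decidable (Spec_normalize_sync_manifest_report_formats formats out) := by unfold Spec_normalize_sync_manifest_report_formats; infer_instance

-- ===== CLAIM (what is proved, stated in full; the proofs are below) =====
def Claim_equal_normalize_sync_manifest_report_formats : Prop := ∀ (formats : Option (List String)), Dom_normalize_sync_manifest_report_formats formats → Pre_normalize_sync_manifest_report_formats formats → Spec_normalize_sync_manifest_report_formats formats (normalize_sync_manifest_report_formats formats)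

-- ===== LEMMAS AND PROOFS =====
theorem pvWitness_ok :
    Dom_normalize_sync_manifest_report_formats pvWitness_normalize_sync_manifest_report_formats ∧
    Pre_normalize_sync_manifest_report_formats pvWitness_normalize_sync_manifest_report_formats := by
  decide

-- the list A's accumulator holds when B's state is (fj, fm) and all stored
-- indices are the first-contribution positions seen so far
def pvStateList : Option Int → Option Int → List String
  | none, none => []
  | some _, none => ["json"]
  | none, some _ => ["markdown"]
  | some i, some j => if i ≤ j then ["json", "markdown"] else ["markdown", "json"]

-- bumping the bound when the loop moves to the next position
theorem pvUpd_lt (fo : Option Int) (pos : Int) (h : ∀ i, fo = some i → i < pos) :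
    ∀ i, (if fo = none then some pos else fo) = some i → i < pos + 1 := by
  rcases fo with _ | k
  · intro i hi; simp at hi; omega
  · intro i hi; simp at hi; have := h k rfl; omega

theorem pvKeep_lt (fo : Option Int) (pos : Int) (h : ∀ i, fo = some i → i < pos) :
    ∀ i, fo = some i → i < pos + 1 := fun i hi => by have := h i hi; omega

-- loop invariant: running A's loop from the accumulator corresponding to B's
-- state equals running B's loop and decoding its final state, provided every
-- stored index is < pos
theorem pvLoop_rel (rest : List String) (pos : Int) (fj fm : Option Int)
    (hj : ∀ i, fj = some i → i < pos) (hm : ∀ j, fm = some j → j < pos) :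
    pvAloop (pvStateList fj fm) rest
      = (pvBloop pos fj fm rest).map (fun st => pvStateList st.1 st.2) := by
  induction rest generalizing pos fj fm with
  | nil => simp [pvAloop, pvBloop]
  | cons v rest ih =>
    simp only [pvAloop, pvBloop]
    by_cases h0 : PySem.Str.lower (PySem.Str.strip v) = ""
    · rw [if_pos h0, if_pos h0]
      exact ih (pos + 1) fj fm (pvKeep_lt fj pos hj) (pvKeep_lt fm pos hm)
    · rw [if_neg h0, if_neg h0]
      by_cases h1 : PySem.Str.lower (PySem.Str.strip v) = "all"
      · rw [if_pos h1, if_pos h1]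
        have step : ["json", "markdown"].foldl pvAppendIfNew (pvStateList fj fm)
            = pvStateList (if fj = none then some pos else fj)
                (if fm = none then some pos else fm) := by
          rcases fj with _ | i <;> rcases fm with _ | j
          · simp [pvStateList, pvAppendIfNew, List.foldl]
          · have h := hm j rfl
            simp [pvStateList, pvAppendIfNew, List.foldl]
            omega
          · have h := hj i rfl
            simp [pvStateList, pvAppendIfNew, List.foldl]
            omega
          · by_cases hij : i ≤ j <;>
              simp [pvStateList, pvAppendIfNew, List.foldl, hij]
        rw [step]
        exact ih (pos + 1) _ _ (pvUpd_lt fj pos hj) (pvUpd_lt fm pos hm)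
      · rw [if_neg h1, if_neg h1]
        by_cases h2 : PySem.Str.lower (PySem.Str.strip v) ∈ ["json", "markdown"]
        · rw [if_neg (show ¬¬_ from not_not_intro h2)]
          simp only [List.mem_cons, List.not_mem_nil, or_false] at h2
          rcases h2 with h2 | h2
          · rw [if_pos h2]
            have step : pvAppendIfNew (pvStateList fj fm) (PySem.Str.lower (PySem.Str.strip v))
                = pvStateList (if fj = none then some pos else fj) fm := by
              rw [h2]
              rcases fj with _ | i <;> rcases fm with _ | j
              · simp [pvStateList, pvAppendIfNew]
              · have h := hm j rfl
                simp [pvStateList, pvAppendIfNew]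
                omega
              · simp [pvStateList, pvAppendIfNew]
              · by_cases hij : i ≤ j <;> simp [pvStateList, pvAppendIfNew, hij]
            rw [step]
            exact ih (pos + 1) _ _ (pvUpd_lt fj pos hj) (pvKeep_lt fm pos hm)
          · rw [if_neg (by simp [h2]), if_pos h2]
            have step : pvAppendIfNew (pvStateList fj fm) (PySem.Str.lower (PySem.Str.strip v))
                = pvStateList fj (if fm = none then some pos else fm) := by
              rw [h2]
              rcases fj with _ | i <;> rcases fm with _ | j
              · simp [pvStateList, pvAppendIfNew]
              · simp [pvStateList, pvAppendIfNew]
              · have h := hj i rfl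
                simp [pvStateList, pvAppendIfNew]
                omega
              · by_cases hij : i ≤ j <;> simp [pvStateList, pvAppendIfNew, hij]
            rw [step]
            exact ih (pos + 1) _ _ (pvKeep_lt fj pos hj) (pvUpd_lt fm pos hm)
        · rw [if_pos h2]
          have hJ : ¬ PySem.Str.lower (PySem.Str.strip v) = "json" :=
            fun h => h2 (by simp [h])
          have hM : ¬ PySem.Str.lower (PySem.Str.strip v) = "markdown" :=
            fun h => h2 (by simp [h])
          rw [if_neg hJ, if_neg hM]
          rfl

-- ===== VERDICT (by name: the statement is the Claim_ definition above) =====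
theorem normalize_sync_manifest_report_formats_spec : Claim_equal_normalize_sync_manifest_report_formats := by
  intro formats _ _
  unfold Spec_normalize_sync_manifest_report_formats
  unfold normalize_sync_manifest_report_formats normalize_sync_manifest_report_formats_alt
  cases formats with
  | none => rfl
  | some fs =>
    by_cases hfs : fs = []
    · simp [hfs]
    · simp only [hfs, if_false]
      have h := pvLoop_rel fs 0 none none (by simp) (by simp)
      simp only [pvStateList] at h
      rw [h]
      cases hb : pvBloop 0 none none fs with
      | none => rfl
      | some st =>
        obtain ⟨fj, fm⟩ := st
        rcases fj with _ | i <;> rcases fm with _ | j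
        · simp [pvStateList]
        · simp [pvStateList]
        · simp [pvStateList]
        · simp only [pvStateList, Option.map_some]
          split <;> simp
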